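-- pv_equiv track=rewrite | github.com/Mohanned29/Limitations-of-Multithreading-in-Python-and-Task-Optimization | final_test.py | generator_task_wrapper
-- ===== SOURCE A (Python) =====
-- def generator_task(n):
--     for i in range(n):
--         yield i
--     return "generator_complete"
--
-- def generator_task_wrapper(n):
--     gen = generator_task(n)
--     output = []
--     try:
--         while True:
--             output.append(next(gen))
--     except StopIteration as e:
--         final = e.value
--     return (output, final)
-- ===== SOURCE B (Python) =====
-- def generator_task_wrapper(n):
--     return (list(range(n)), "generator_complete")
-- ===== Notes on version B (the rewrite author's own statement) =====
-- stated objective: simpler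
-- what changed: Drops the generator and the next()/StopIteration drive loop entirely; B builds the list directly from range(n) and pairs it with the literal sentinel string.
import Mathlib
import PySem

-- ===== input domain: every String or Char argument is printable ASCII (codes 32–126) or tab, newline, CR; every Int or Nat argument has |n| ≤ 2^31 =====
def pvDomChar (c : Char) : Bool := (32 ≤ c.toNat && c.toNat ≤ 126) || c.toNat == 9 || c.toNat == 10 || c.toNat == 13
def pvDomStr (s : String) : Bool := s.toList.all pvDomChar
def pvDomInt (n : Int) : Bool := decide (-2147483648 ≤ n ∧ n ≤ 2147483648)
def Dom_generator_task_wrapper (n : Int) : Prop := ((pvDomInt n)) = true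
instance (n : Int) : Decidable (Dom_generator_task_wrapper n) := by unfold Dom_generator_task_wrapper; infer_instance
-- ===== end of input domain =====

-- B drops the generator/StopIteration drive loop and builds the pair directly from range(n); objective: simpler.

-- ===== PORT A =====
-- A drives the generator with next(): each step i < n yields i (appended to output);
-- at i = n the generator returns, i.e. StopIteration with value "generator_complete".
def pvDrive (n : Int) (i : Int) (acc : List Int) : List Int × String :=
  if _h : i < n then pvDrive n (i + 1) (acc ++ [i])
  else (acc, "generator_complete")
termination_by (n - i).toNat
decreasing_by omega

def generator_task_wrapper (n : Int) : List Int × String :=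
  pvDrive n 0 []

-- ===== PORT B =====
def generator_task_wrapper_alt (n : Int) : List Int × String :=
  (PySem.List.pyRange 0 n 1, "generator_complete")

-- ===== PRECONDITION & SPEC =====
def Spec_generator_task_wrapper (n : Int) (out : List Int × String) : Prop := out = generator_task_wrapper_alt n
instance (n : Int) (out : List Int × String) : Decidable (Spec_generator_task_wrapper n out) := by unfold Spec_generator_task_wrapper; infer_instance

-- ===== CLAIM (what is proved, stated in full; the proofs are below) =====
def Claim_equal_generator_task_wrapper : Prop := ∀ (n : Int), Dom_generator_task_wrapper n → Spec_generator_task_wrapper n (generator_task_wrapper n)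

-- ===== LEMMAS AND PROOFS =====
theorem pvDrive_eq (n : Int) : ∀ (i : Int) (acc : List Int),
    pvDrive n i acc = (acc ++ PySem.List.pyRange i n 1, "generator_complete") := by
  intro i acc
  rw [pvDrive]
  split_ifs with h
  · rw [pvDrive_eq n (i + 1) (acc ++ [i]), PySem.List.pyRange_one_cons h]
    simp
  · rw [PySem.List.pyRange_one_eq_nil (by omega)]
    simp
termination_by i _ => (n - i).toNat
decreasing_by omega

-- ===== VERDICT (by name: the statement is the Claim_ definition above) =====
theorem generator_task_wrapper_spec : Claim_equal_generator_task_wrapper := by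
  intro n _
  unfold Spec_generator_task_wrapper generator_task_wrapper generator_task_wrapper_alt
  rw [pvDrive_eq]
  simp
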